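-- pv_equiv track=rewrite | github.com/MrBrantCode/unitest_baseline | mut_generate/mist_train_taco/taco_1152/solution.py | count_ways_to_play_stages
-- ===== SOURCE A (Python) =====
-- import bisect
--
-- def count_ways_to_play_stages(N, T, levels):
--     """
--     Calculate the number of ways to play all the stages at once, honoring the convention
--     that the rabbit can play up to T or less levels easier stages than the preceding one.
--
--     Parameters:
--     N (int): The number of stages.
--     T (int): The compromise level.
--     levels (list[int]): A list of integers representing the difficulty levels of each stage.
--
--     Returns:
--     int: The number of ways to play all the stages at once, modulo 1,000,000,007.
--     """
--     levels.sort()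
--     ans = 1
--     for i in range(N):
--         cnt = i - bisect.bisect_left(levels, levels[i] - T) + 1
--         ans *= cnt
--         ans %= 1000000007
--     return ans
-- ===== SOURCE B (Python) =====
-- def count_ways_to_play_stages(N, T, levels):
--     levels.sort()
--     MOD = 1000000007
--     if N <= 0:
--         return 1
--     # run-length encode the sorted difficulty list
--     runs = []
--     i = 0
--     while i < len(levels):
--         j = i + 1
--         while j < len(levels) and levels[j] == levels[i]:
--             j += 1
--         runs.append((levels[i], j - i))
--         i = j
--     # a run of m equal values v starting at position p contributes the
--     # consecutive counts w, w+1, ..., w+m-1 with w = p - (#elements < v-T) + 1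
--     cnts = []
--     p = 0
--     for v, m in runs:
--         low = sum(m2 for v2, m2 in runs if v2 < v - T)
--         w = p - low + 1
--         cnts.extend(range(w, w + m))
--         p += m
--     ans = 1
--     for c in cnts[:N]:
--         ans = ans * c % MOD
--     return ans
-- ===== Notes on version B (the rewrite author's own statement) =====
-- stated objective: alternative
-- what changed: Instead of a per-index binary search, B run-length-encodes the sorted list and emits each run's counts as one consecutive arithmetic block (the boundary count is a per-run sum over the run table), then reduces the first N counts mod 1e9+7.
import Mathlib
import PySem

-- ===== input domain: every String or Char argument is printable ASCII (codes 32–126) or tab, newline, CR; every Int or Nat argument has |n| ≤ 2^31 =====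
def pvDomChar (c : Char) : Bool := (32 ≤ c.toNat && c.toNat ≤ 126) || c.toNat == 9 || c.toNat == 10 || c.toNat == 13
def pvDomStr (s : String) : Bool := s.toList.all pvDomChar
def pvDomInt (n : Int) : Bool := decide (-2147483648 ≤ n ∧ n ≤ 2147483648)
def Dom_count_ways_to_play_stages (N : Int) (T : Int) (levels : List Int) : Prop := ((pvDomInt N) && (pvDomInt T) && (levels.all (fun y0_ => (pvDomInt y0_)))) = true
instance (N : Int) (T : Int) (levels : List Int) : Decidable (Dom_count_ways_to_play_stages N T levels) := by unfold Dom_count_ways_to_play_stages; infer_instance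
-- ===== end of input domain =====

-- B replaces the per-index binary search with a run-length encoding of the sorted list:
-- each run of equal values contributes a block of consecutive counts (alternative decomposition).
-- Python A (and B) sort `levels` in place; the equivalence proved here is about the return value only.

-- ===== PORT A =====
-- sort, then for each i in range(N) multiply by i - bisect_left(levels, levels[i]-T) + 1, mod 1e9+7.
def count_ways_to_play_stages (N : Int) (T : Int) (levels : List Int) : Int :=
  let ls := PySem.List.sorted levels (fun x => x) false
  (PySem.List.pyRange 0 N 1).foldl (fun ans i =>
    let cnt : Int := i - (PySem.List.bisectLeft ls (PySem.List.pyGetD ls i 0 - T) : Int) + 1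
    PySem.Int.mod (ans * cnt) 1000000007) 1

-- ===== PORT B =====
-- run-length encoding of the sorted list (the two nested while loops of Source B)
def rleB : List Int → List (Int × Int)
  | [] => []
  | v :: rest =>
    (v, 1 + ((rest.takeWhile (fun x => x == v)).length : Int)) ::
      rleB (rest.dropWhile (fun x => x == v))
termination_by ls => ls.length
decreasing_by
  simp only [List.length_cons]
  have := List.length_dropWhile_le (fun x => x == v) rest
  omega

-- sum(m2 for v2, m2 in runs if v2 < v - T)
def lowB (runs : List (Int × Int)) (T : Int) (v : Int) : Int :=
  (runs.filter (fun vm2 => decide (vm2.1 < v - T))).foldl (fun a vm2 => a + vm2.2) 0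

-- the loop building cnts: state (p, cnts); each run appends range(w, w+m)
def buildB (runs : List (Int × Int)) (T : Int) : Int × List Int :=
  runs.foldl (fun (s : Int × List Int) vm =>
    let w := s.1 - lowB runs T vm.1 + 1
    (s.1 + vm.2, s.2 ++ PySem.List.pyRange w (w + vm.2) 1)) (0, [])

def count_ways_to_play_stages_alt (N : Int) (T : Int) (levels : List Int) : Int :=
  let ls := PySem.List.sorted levels (fun x => x) false
  if N ≤ 0 then 1
  else
    let runs := rleB ls
    let cnts := (buildB runs T).2
    (PySem.List.slice cnts none (some N)).foldl
      (fun ans c => PySem.Int.mod (ans * c) 1000000007) 1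

-- ===== PRECONDITION & SPEC =====
-- Pre_: Python A raises IndexError (levels[i]) exactly when N > len(levels); both programs return otherwise.
def Pre_count_ways_to_play_stages (N : Int) (T : Int) (levels : List Int) : Prop :=
  N ≤ (levels.length : Int)
instance (N : Int) (T : Int) (levels : List Int) : Decidable (Pre_count_ways_to_play_stages N T levels) := by
  unfold Pre_count_ways_to_play_stages; infer_instance

def pvWitness_count_ways_to_play_stages : Int × Int × List Int := (3, 1, [2, 1, 3])

def Spec_count_ways_to_play_stages (N : Int) (T : Int) (levels : List Int) (out : Int) : Prop := out = count_ways_to_play_stages_alt N T levels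
instance (N : Int) (T : Int) (levels : List Int) (out : Int) : Decidable (Spec_count_ways_to_play_stages N T levels out) := by unfold Spec_count_ways_to_play_stages; infer_instance

-- ===== CLAIM (what is proved, stated in full; the proofs are below) =====
def Claim_equal_count_ways_to_play_stages : Prop := ∀ (N : Int) (T : Int) (levels : List Int), Dom_count_ways_to_play_stages N T levels → Pre_count_ways_to_play_stages N T levels → Spec_count_ways_to_play_stages N T levels (count_ways_to_play_stages N T levels)

-- ===== LEMMAS AND PROOFS =====

-- the flat list a run list denotes
def replRuns (rs : List (Int × Int)) : List Int :=
  rs.flatMap (fun vm => List.replicate vm.2.toNat vm.1)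

-- spec-level segment list produced by buildB from state p0 over remaining runs rs
def segB (runs : List (Int × Int)) (T : Int) : Int → List (Int × Int) → List Int
  | _, [] => []
  | p0, vm :: rest =>
      PySem.List.pyRange (p0 - lowB runs T vm.1 + 1) (p0 - lowB runs T vm.1 + 1 + vm.2) 1 ++
        segB runs T (p0 + vm.2) rest

-- the per-index count A computes, expressed with countP
def gIdx (ls : List Int) (T : Int) (i : Nat) : Int :=
  (i : Int) - (ls.countP (fun x => decide (x < ls.getD i 0 - T)) : Int) + 1

lemma rleB_flat (ls : List Int) : replRuns (rleB ls) = ls := by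
  induction hls : ls.length using Nat.strong_induction_on generalizing ls with
  | _ n ih =>
    cases ls with
    | nil => simp [rleB, replRuns]
    | cons v rest =>
      rw [rleB]
      have htw : ∀ x ∈ rest.takeWhile (fun x => x == v), x = v := by
        intro x hx
        have hp := List.mem_takeWhile_imp hx
        simpa using hp
      have hrepl : rest.takeWhile (fun x => x == v) =
          List.replicate (rest.takeWhile (fun x => x == v)).length v :=
        List.eq_replicate_of_mem htw
      have hsplit : rest.takeWhile (fun x => x == v) ++ rest.dropWhile (fun x => x == v) = rest :=
        List.takeWhile_append_dropWhile
      have hlen : (rest.dropWhile (fun x => x == v)).length < n := by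
        have := List.length_dropWhile_le (fun x => x == v) rest
        simp at hls; omega
      have hih := ih _ hlen (rest.dropWhile (fun x => x == v)) rfl
      simp only [replRuns, List.flatMap_cons] at *
      have htonat : ((1 : Int) + ((rest.takeWhile (fun x => x == v)).length : Int)).toNat
          = 1 + (rest.takeWhile (fun x => x == v)).length := by omega
      rw [htonat, List.replicate_add, List.replicate_one, hih]
      simp only [List.cons_append, List.nil_append]
      rw [← hrepl, hsplit]

lemma rleB_pos (ls : List Int) : ∀ vm ∈ rleB ls, 1 ≤ vm.2 := by
  induction hls : ls.length using Nat.strong_induction_on generalizing ls with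
  | _ n ih =>
    cases ls with
    | nil => simp [rleB]
    | cons v rest =>
      rw [rleB]
      intro vm hvm
      rcases List.mem_cons.mp hvm with h | h
      · subst h; simp
      · have hlen : (rest.dropWhile (fun x => x == v)).length < n := by
          have := List.length_dropWhile_le (fun x => x == v) rest
          simp at hls; omega
        exact ih _ hlen _ rfl vm h

lemma foldl_add_snd (l : List (Int × Int)) (a : Int) :
    l.foldl (fun a vm2 => a + vm2.2) a = a + (l.map (·.2)).sum := by
  induction l generalizing a with
  | nil => simp
  | cons x xs ih => simp [ih, add_assoc]

lemma lowB_eq_countP (runs : List (Int × Int)) (T v : Int)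
    (hpos : ∀ vm ∈ runs, 1 ≤ vm.2) :
    lowB runs T v = ((replRuns runs).countP (fun x => decide (x < v - T)) : Int) := by
  induction runs with
  | nil => simp [lowB, replRuns]
  | cons vm rest ih =>
    have hpos' : ∀ x ∈ rest, 1 ≤ x.2 := fun x hx => hpos x (List.mem_cons_of_mem _ hx)
    have ihr := ih hpos'
    have hm : 1 ≤ vm.2 := hpos vm (List.mem_cons_self)
    simp only [lowB, replRuns, List.flatMap_cons, List.countP_append, List.filter_cons] at *
    rw [List.countP_replicate]
    by_cases hv : vm.1 < v - T
    · simp only [hv, decide_true, if_pos]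
      simp only [List.foldl_cons, foldl_add_snd] at *
      push_cast
      omega
    · simp only [hv, decide_false, if_neg, Bool.false_eq_true, not_false_iff]
      simp only [foldl_add_snd] at *
      push_cast
      omega

lemma buildB_snd (runs : List (Int × Int)) (T : Int) :
    ∀ (rs : List (Int × Int)) (p0 : Int) (acc : List Int),
      (rs.foldl (fun (s : Int × List Int) vm =>
        let w := s.1 - lowB runs T vm.1 + 1
        (s.1 + vm.2, s.2 ++ PySem.List.pyRange w (w + vm.2) 1)) (p0, acc)).2
      = acc ++ segB runs T p0 rs := by
  intro rs
  induction rs with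
  | nil => intro p0 acc; simp [segB]
  | cons vm rest ih =>
    intro p0 acc
    simp only [List.foldl_cons, segB]
    rw [ih]
    simp [List.append_assoc]

lemma segB_maps (ls : List Int) (runs : List (Int × Int)) (T : Int) :
    ∀ (rs : List (Int × Int)) (p0 : Nat),
      ls.drop p0 = replRuns rs →
      (∀ vm ∈ rs, 1 ≤ vm.2) →
      (∀ vm ∈ rs, lowB runs T vm.1 = (ls.countP (fun x => decide (x < vm.1 - T)) : Int)) →
      segB runs T (p0 : Int) rs = (List.range (replRuns rs).length).map (fun k => gIdx ls T (p0 + k)) := by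
  intro rs
  induction rs with
  | nil => intro p0 _ _ _; simp [segB, replRuns]
  | cons vm rest ih =>
    intro p0 hdrop hpos hlow
    obtain ⟨v, m⟩ := vm
    have hm : 1 ≤ m := hpos (v, m) (List.mem_cons_self)
    have hmn : ((m.toNat : Int)) = m := by omega
    have hflat : replRuns ((v, m) :: rest) = List.replicate m.toNat v ++ replRuns rest := by
      simp [replRuns]
    have hlenflat : (replRuns ((v, m) :: rest)).length = m.toNat + (replRuns rest).length := by
      simp [hflat]
    -- first segment: pyRange w (w + m) 1 = (range m.toNat).map (w + ·)
    have hw : segB runs T (p0 : Int) ((v, m) :: rest) =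
        PySem.List.pyRange ((p0 : Int) - lowB runs T v + 1) ((p0 : Int) - lowB runs T v + 1 + m) 1 ++
          segB runs T ((p0 : Int) + m) rest := rfl
    rw [hw]
    rw [hlenflat, List.range_add, List.map_append, List.map_map]
    congr 1
    · -- head run
      rw [PySem.List.pyRange_one]
      have : (((p0 : Int) - lowB runs T v + 1 + m) - ((p0 : Int) - lowB runs T v + 1)).toNat = m.toNat := by
        omega
      rw [this]
      apply List.map_congr_left
      intro k hk
      have hkm : k < m.toNat := List.mem_range.mp hk
      -- ls[p0 + k] = v
      have hget : ls.getD (p0 + k) 0 = v := by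
        have h1 : ls[p0 + k]? = (ls.drop p0)[k]? := by
          rw [List.getElem?_drop]
        have h2 : (ls.drop p0)[k]? = some v := by
          rw [hdrop, hflat]
          rw [List.getElem?_append_left (by simpa using hkm)]
          simp [hkm]
        simp [List.getD, h1, h2]
      simp only [gIdx, hget]
      rw [hlow (v, m) (List.mem_cons_self)]
      push_cast
      ring
    · -- tail runs
      have hdrop' : ls.drop (p0 + m.toNat) = replRuns rest := by
        have : ls.drop (p0 + m.toNat) = (ls.drop p0).drop m.toNat := by
          rw [List.drop_drop, Nat.add_comm]
        rw [this, hdrop, hflat]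
        rw [List.drop_append_of_le_length (by simp)]
        simp
      have hpos' : ∀ x ∈ rest, 1 ≤ x.2 := fun x hx => hpos x (List.mem_cons_of_mem _ hx)
      have hlow' : ∀ x ∈ rest, lowB runs T x.1 = (ls.countP (fun y => decide (y < x.1 - T)) : Int) :=
        fun x hx => hlow x (List.mem_cons_of_mem _ hx)
      have hih := ih (p0 + m.toNat) hdrop' hpos' hlow'
      have hcast : ((p0 + m.toNat : Nat) : Int) = (p0 : Int) + m := by push_cast; omega
      rw [← hcast, hih]
      apply List.map_congr_left
      intro k _
      show gIdx ls T (p0 + m.toNat + k) = gIdx ls T (p0 + (m.toNat + k))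
      congr 1
      omega

lemma bisectLeft_eq_countP (ls : List Int) (t : Int) (hs : ls.Pairwise (· ≤ ·)) :
    PySem.List.bisectLeft ls t = ls.countP (fun x => decide (x < t)) := by
  obtain ⟨hb1, hb2, hb3⟩ := PySem.List.bisectLeft_spec ls t hs
  set b := PySem.List.bisectLeft ls t with hbdef
  have hlen : (ls.take b).length = b := List.length_take_of_le hb1
  have hsum : ls.countP (fun x => decide (x < t)) =
      (ls.take b).countP (fun x => decide (x < t)) + (ls.drop b).countP (fun x => decide (x < t)) := by
    conv_lhs => rw [← List.take_append_drop b ls]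
    rw [List.countP_append]
  have h1 : (ls.take b).countP (fun x => decide (x < t)) = (ls.take b).length := by
    apply List.countP_eq_length.mpr
    intro a ha
    obtain ⟨i, hi, hgi⟩ := List.mem_iff_getElem.mp ha
    have hib : i < b := by rwa [hlen] at hi
    have hil : i < ls.length := lt_of_lt_of_le hib hb1
    have : (ls.take b)[i] = ls[i] := List.getElem_take
    rw [this] at hgi
    subst hgi
    exact decide_eq_true (hb2 i hil hib)
  have h2 : (ls.drop b).countP (fun x => decide (x < t)) = 0 := by
    apply List.countP_eq_zero.mpr
    intro a ha
    obtain ⟨i, hi, hgi⟩ := List.mem_iff_getElem.mp ha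
    rw [List.getElem_drop] at hgi
    have hil : b + i < ls.length := by
      have := List.length_drop (l := ls) (i := b); omega
    subst hgi
    simp only [decide_eq_true_eq]
    exact not_lt.mpr (hb3 (b + i) hil (Nat.le_add_right b i))
  omega

-- ===== VERDICT (by name: the statement is the Claim_ definition above) =====
theorem count_ways_to_play_stages_spec : Claim_equal_count_ways_to_play_stages := by
  intro N T levels _ hpre
  unfold Pre_count_ways_to_play_stages at hpre
  unfold Spec_count_ways_to_play_stages count_ways_to_play_stages count_ways_to_play_stages_alt
  simp only []
  set ls := PySem.List.sorted levels (fun x => x) false with hls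
  have hs : ls.Pairwise (· ≤ ·) := PySem.List.sorted_pairwise levels (fun x => x)
  have hlen : ls.length = levels.length := PySem.List.length_sorted levels (fun x => x) false
  by_cases hN : N ≤ 0
  · rw [PySem.List.pyRange_one_eq_nil hN, if_pos hN]
    simp
  · rw [if_neg hN]
    rw [not_le] at hN
    -- B's cnts list
    have hflat : replRuns (rleB ls) = ls := rleB_flat ls
    have hpos := rleB_pos ls
    have hlow : ∀ vm ∈ rleB ls, lowB (rleB ls) T vm.1 = (ls.countP (fun x => decide (x < vm.1 - T)) : Int) := by
      intro vm _
      rw [lowB_eq_countP (rleB ls) T vm.1 hpos, hflat]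
    have hcnts : (buildB (rleB ls) T).2 = (List.range ls.length).map (fun k => gIdx ls T k) := by
      unfold buildB
      rw [buildB_snd (rleB ls) T (rleB ls) 0 []]
      have := segB_maps ls (rleB ls) T (rleB ls) 0 (by simpa using hflat.symm) hpos hlow
      simp only [Nat.cast_zero] at this
      rw [this, hflat]
      simp
    rw [hcnts]
    -- both folds over range N.toNat
    have hNle : N.toNat ≤ ls.length := by omega
    have hNcast : ((N.toNat : Nat) : Int) = N := by omega
    rw [PySem.List.slice_to _ (le_of_lt hN)]
    rw [← List.map_take, List.take_range, Nat.min_eq_left hNle, List.foldl_map]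
    have hrange : PySem.List.pyRange 0 N 1 = (List.range N.toNat).map (fun k : Nat => (0 : Int) + (k : Int)) := by
      rw [PySem.List.pyRange_one]
      norm_num
    rw [hrange, List.foldl_map]
    apply PySem.List.foldl_congr_mem
    intro acc k hk
    have hkN : k < N.toNat := List.mem_range.mp hk
    have hkl : k < ls.length := lt_of_lt_of_le hkN hNle
    have hget : PySem.List.pyGetD ls ((0 : Int) + k) 0 = ls[k] := by
      rw [zero_add, PySem.List.pyGetD_natCast]
      simp [hkl]
    have hgetD : ls.getD k 0 = ls[k] := List.getD_eq_getElem ls 0 hkl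
    simp only [gIdx, hget, hgetD]
    rw [bisectLeft_eq_countP ls (ls[k] - T) hs]
    ring_nf
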